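-- pv_equiv track=rewrite | github.com/yukikurisu1990-gh/fx-ai-trading | scripts/stage23_0c_rev1_signal_quality_eval.py | overall_verdict
-- ===== SOURCE A (Python) =====
-- def overall_verdict(per_filter_verdicts: dict[str, str]) -> tuple[str, str | None]:
--     """Return (verdict, winning_filter_name_or_None)."""
--     for v in ("ADOPT_CANDIDATE",):
--         for fname, vfilter in per_filter_verdicts.items():
--             if vfilter == v:
--                 return v, fname
--     for v in ("PROMISING_BUT_NEEDS_OOS",):
--         for fname, vfilter in per_filter_verdicts.items():
--             if vfilter == v:
--                 return v, fname
--     return "REJECT", None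
-- ===== SOURCE B (Python) =====
-- def overall_verdict(per_filter_verdicts: dict[str, str]) -> tuple[str, str | None]:
--     """Return (verdict, winning_filter_name_or_None)."""
--     # One pass: record the first filter name seen for each verdict, then
--     # resolve the priority order against that table.
--     first_by_verdict = {}
--     for fname, vfilter in per_filter_verdicts.items():
--         first_by_verdict.setdefault(vfilter, fname)
--     for v in ("ADOPT_CANDIDATE", "PROMISING_BUT_NEEDS_OOS"):
--         if v in first_by_verdict:
--             return v, first_by_verdict[v]
--     return "REJECT", None
-- ===== Notes on version B (the rewrite author's own statement) =====
-- stated objective: alternative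
-- what changed: Replaced A's two full priority-ordered scans of the items with a single collection pass that records the first filter name per verdict in a dict, followed by a priority lookup against that table.
import Mathlib
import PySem

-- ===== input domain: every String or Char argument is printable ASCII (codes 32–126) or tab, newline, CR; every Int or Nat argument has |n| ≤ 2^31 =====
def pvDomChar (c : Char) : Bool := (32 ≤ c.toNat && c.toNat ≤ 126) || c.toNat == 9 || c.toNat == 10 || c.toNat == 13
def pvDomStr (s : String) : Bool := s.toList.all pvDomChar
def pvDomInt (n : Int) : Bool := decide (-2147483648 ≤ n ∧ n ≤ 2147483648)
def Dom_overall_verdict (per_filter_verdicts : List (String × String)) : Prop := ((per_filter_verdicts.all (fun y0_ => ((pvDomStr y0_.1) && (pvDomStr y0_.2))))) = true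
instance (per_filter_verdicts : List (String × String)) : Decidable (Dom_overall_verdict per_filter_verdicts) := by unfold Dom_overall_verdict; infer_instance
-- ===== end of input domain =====

-- B collects a verdict -> first-filter-name table in one pass and resolves priority against it (alternative decomposition, same cost).


-- ===== PORT A =====
-- inner 'for fname, vfilter in items: if vfilter == v: return v, fname' loop (early return = first match)
def pvScanFor (v : String) : List (String × String) → Option String
  | [] => none
  | (fname, vfilter) :: rest => if vfilter == v then some fname else pvScanFor v rest

def overall_verdict (per_filter_verdicts : List (String × String)) : String × Option String :=
  match pvScanFor "ADOPT_CANDIDATE" per_filter_verdicts with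
  | some fname => ("ADOPT_CANDIDATE", some fname)
  | none =>
    match pvScanFor "PROMISING_BUT_NEEDS_OOS" per_filter_verdicts with
    | some fname => ("PROMISING_BUT_NEEDS_OOS", some fname)
    | none => ("REJECT", none)

-- ===== PORT B =====
def overall_verdict_alt (per_filter_verdicts : List (String × String)) : String × Option String :=
  let first_by_verdict :=
    per_filter_verdicts.foldl
      (fun d (p : String × String) => PySem.Dict.setdefault d p.2 p.1)
      (PySem.Dict.empty : PySem.Dict String String)
  match PySem.Dict.get? first_by_verdict "ADOPT_CANDIDATE" with
  | some f => ("ADOPT_CANDIDATE", some f)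
  | none =>
    match PySem.Dict.get? first_by_verdict "PROMISING_BUT_NEEDS_OOS" with
    | some f => ("PROMISING_BUT_NEEDS_OOS", some f)
    | none => ("REJECT", none)

-- ===== PRECONDITION & SPEC =====
def Spec_overall_verdict (per_filter_verdicts : List (String × String)) (out : String × Option String) : Prop := out = overall_verdict_alt per_filter_verdicts
instance (per_filter_verdicts : List (String × String)) (out : String × Option String) : Decidable (Spec_overall_verdict per_filter_verdicts out) := by unfold Spec_overall_verdict; infer_instance

-- ===== CLAIM (what is proved, stated in full; the proofs are below) =====
def Claim_equal_overall_verdict : Prop := ∀ (per_filter_verdicts : List (String × String)), Dom_overall_verdict per_filter_verdicts → Spec_overall_verdict per_filter_verdicts (overall_verdict per_filter_verdicts)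

-- ===== LEMMAS AND PROOFS =====
-- The setdefault loop's dict answers a key with the FIRST pair carrying that verdict.
theorem get?_setdefault (d : PySem.Dict String String) (k x v : String) :
    (d.setdefault k x).get? v = ((d.get? v).or (if k == v then some x else none)) := by
  unfold PySem.Dict.setdefault
  have hci := PySem.Dict.contains_eq_isSome_get? d k
  by_cases hc : d.contains k
  · simp only [hc, if_true]
    by_cases hv : k = v
    · subst hv
      rcases h : d.get? k with _ | y
      · rw [hc, h] at hci; simp at hci
      · simp
    · simp [beq_iff_eq, hv]
  · rw [if_neg hc]
    rcases hf : List.find? (fun p => p.1 == v) d.items with _ | p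
    · by_cases hv : (k == v) = true <;>
        simp [PySem.Dict.get?, List.find?_append, hf, hv]
    · simp [PySem.Dict.get?, List.find?_append, hf]

-- The setdefault loop's dict answers a key with the FIRST pair carrying that verdict.
theorem get?_foldl_setdefault (l : List (String × String)) (d : PySem.Dict String String) (v : String) :
    (l.foldl (fun d (p : String × String) => PySem.Dict.setdefault d p.2 p.1) d).get? v
      = ((d.get? v).or (pvScanFor v l)) := by
  induction l generalizing d with
  | nil => simp [pvScanFor]
  | cons p t ih =>
    obtain ⟨fname, vfilter⟩ := p
    rw [List.foldl_cons, ih, get?_setdefault, Option.or_assoc]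
    by_cases hv : vfilter == v <;> simp [pvScanFor, hv]

-- ===== VERDICT (by name: the statement is the Claim_ definition above) =====
theorem overall_verdict_spec : Claim_equal_overall_verdict := by
  intro l _
  unfold Spec_overall_verdict overall_verdict overall_verdict_alt
  simp only [get?_foldl_setdefault, PySem.Dict.get?_empty, Option.none_or]
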